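-- pv_equiv track=rewrite | github.com/xAdotx/PotL0gics | app/poker_engine.py | _find_two_pair
-- ===== SOURCE A (Python) =====
-- from typing import List, Dict, Any, Tuple, Optional
--
-- def _find_two_pair(values: List[int]) -> Optional[Tuple[int, int]]:
--     """Find two pair"""
--     pairs = []
--     for value in set(values):
--         if values.count(value) == 2:
--             pairs.append(value)
--
--     if len(pairs) >= 2:
--         pairs.sort(reverse=True)
--         return (pairs[0], pairs[1])
--     return None
-- ===== SOURCE B (Python) =====
-- from typing import List, Optional, Tuple
--
-- def _find_two_pair(values: List[int]) -> Optional[Tuple[int, int]]: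
--     """Find two pair: sort once, scan runs of equal values, keep runs of length exactly 2."""
--     s = sorted(values)
--     pairs = []
--     i = 0
--     n = len(s)
--     while i < n:
--         j = i
--         while j < n and s[j] == s[i]:
--             j += 1
--         if j - i == 2:
--             pairs.append(s[i])
--         i = j
--     if len(pairs) >= 2:
--         return (pairs[-1], pairs[-2])
--     return None
-- ===== Notes on version B (the rewrite author's own statement) =====
-- stated objective: faster
-- what changed: A runs a full count() scan of the list for every distinct value; B sorts a copy once and collects pair values in a single run-length scan over the sorted list, reading the top two off the (ascending) result's tail.
import Mathlib
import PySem

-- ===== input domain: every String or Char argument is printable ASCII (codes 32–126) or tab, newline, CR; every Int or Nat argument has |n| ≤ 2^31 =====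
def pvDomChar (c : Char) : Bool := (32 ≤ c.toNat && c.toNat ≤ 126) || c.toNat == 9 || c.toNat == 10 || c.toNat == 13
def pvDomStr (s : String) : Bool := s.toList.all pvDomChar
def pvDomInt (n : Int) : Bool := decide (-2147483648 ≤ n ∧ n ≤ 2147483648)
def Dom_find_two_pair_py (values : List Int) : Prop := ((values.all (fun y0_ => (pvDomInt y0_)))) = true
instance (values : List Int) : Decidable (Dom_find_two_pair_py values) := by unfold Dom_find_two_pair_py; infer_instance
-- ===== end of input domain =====

-- B replaces A's per-distinct-value counting (a count scan for every element of set(values))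
-- by one sort followed by a single run-length scan; equivalence is about the return value only.

-- ===== PORT A =====
-- Python iterates `set(values)`; the result is set-order independent (the collected pair
-- values are distinct and sorted before use), so the set is consumed in PySem.Set.ofList order.
def find_two_pair_py (values : List Int) : Option (Int × Int) :=
  let pairs := (PySem.Set.ofList values).foldl
    (fun acc value => if values.count value = 2 then acc ++ [value] else acc) []
  if pairs.length ≥ 2 then
    let p := PySem.List.sorted pairs (fun x => x) true
    match PySem.List.pyGet? p 0, PySem.List.pyGet? p 1 with
    | some a, some b => some (a, b)
    | _, _ => none
  else none

-- ===== PORT B =====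
-- Source B's outer while walks the sorted list run by run; the inner `while s[j] == s[i]` is the
-- takeWhile/dropWhile split of the tail, the run has length run.length + 1 (the head included).
def runPairs : List Int → List Int
  | [] => []
  | x :: xs =>
    let run := xs.takeWhile (fun y => y == x)
    let rest := xs.dropWhile (fun y => y == x)
    (if run.length + 1 = 2 then [x] else []) ++ runPairs rest
termination_by s => s.length
decreasing_by simpa using Nat.lt_succ_of_le (List.length_dropWhile_le _ _)

def find_two_pair_py_alt (values : List Int) : Option (Int × Int) :=
  let s := PySem.List.sorted values (fun x => x) false
  let pairs := runPairs s
  if pairs.length ≥ 2 then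
    match PySem.List.pyGet? pairs (-1) with
    | some a =>
      match PySem.List.pyGet? pairs (-2) with
      | some b => some (a, b)
      | none => none
    | none => none
  else none

-- ===== PRECONDITION & SPEC =====
def Spec_find_two_pair_py (values : List Int) (out : Option (Int × Int)) : Prop := out = find_two_pair_py_alt values
instance (values : List Int) (out : Option (Int × Int)) : Decidable (Spec_find_two_pair_py values out) := by unfold Spec_find_two_pair_py; infer_instance

-- ===== CLAIM (what is proved, stated in full; the proofs are below) =====
def Claim_equal_find_two_pair_py : Prop := ∀ (values : List Int), Dom_find_two_pair_py values → Spec_find_two_pair_py values (find_two_pair_py values)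

-- ===== LEMMAS AND PROOFS =====

theorem runPairs_subset (s : List Int) : ∀ v ∈ runPairs s, v ∈ s := by
  induction s using runPairs.induct with
  | case1 => simp [runPairs]
  | case2 x xs run ih =>
    intro v hv
    simp only [runPairs, List.mem_append] at hv
    rcases hv with h | h
    · split at h <;> simp_all
    · have hmem := ih v h
      have : v ∈ xs := (List.dropWhile_sublist _).mem hmem
      simp [this]

theorem runPairs_sorted_facts (s : List Int) (hs : s.Pairwise (· ≤ ·)) :
    (runPairs s).Pairwise (· < ·) ∧ (∀ v : Int, v ∈ runPairs s ↔ s.count v = 2) := by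
  induction s using runPairs.induct with
  | case1 => simp [runPairs]
  | case2 x xs rest ih =>
    rw [List.pairwise_cons] at hs
    obtain ⟨hx, hxs⟩ := hs
    have hrest_sub : (xs.dropWhile (fun y => y == x)).Sublist xs := List.dropWhile_sublist _
    have hrest_sorted : (xs.dropWhile (fun y => y == x)).Pairwise (· ≤ ·) := hxs.sublist hrest_sub
    have hgt : ∀ v ∈ xs.dropWhile (fun y => y == x), x < v := by
      cases hr : xs.dropWhile (fun y => y == x) with
      | nil => simp
      | cons h t =>
        have hhne : h ≠ x := by
          have hh := List.head_dropWhile_not (fun y => y == x)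
            (l := xs) (by rw [hr]; simp)
          simp only [hr, List.head_cons] at hh
          simpa using hh
        have hhx : x ≤ h := hx h (hrest_sub.mem (by rw [hr]; simp))
        have hhlt : x < h := lt_of_le_of_ne hhx (Ne.symm hhne)
        intro v hv
        rw [hr] at hrest_sorted
        rcases List.mem_cons.1 hv with rfl | hv'
        · exact hhlt
        · exact lt_of_lt_of_le hhlt ((List.pairwise_cons.1 hrest_sorted).1 v hv')
    have hxnotin : x ∉ xs.dropWhile (fun y => y == x) := fun h => lt_irrefl x (hgt x h)
    have hsplit : xs.takeWhile (fun y => y == x) ++ xs.dropWhile (fun y => y == x) = xs :=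
      List.takeWhile_append_dropWhile
    have hrun_all : ∀ v ∈ xs.takeWhile (fun y => y == x), v = x := by
      intro v hv; simpa using List.mem_takeWhile_imp hv
    have hcount_run : (xs.takeWhile (fun y => y == x)).count x
        = (xs.takeWhile (fun y => y == x)).length := by
      rw [List.count_eq_length]; intro b hb; exact (hrun_all b hb).symm
    have hcount_rest0 : (xs.dropWhile (fun y => y == x)).count x = 0 :=
      List.count_eq_zero.2 hxnotin
    have hxs_count : xs.count x = (xs.takeWhile (fun y => y == x)).length := by
      conv_lhs => rw [← hsplit]
      rw [List.count_append, hcount_run, hcount_rest0, Nat.add_zero]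
    have hcx : (x :: xs).count x = (xs.takeWhile (fun y => y == x)).length + 1 := by
      rw [List.count_cons_self, hxs_count]
    have hcv : ∀ v : Int, v ≠ x →
        (x :: xs).count v = (xs.dropWhile (fun y => y == x)).count v := by
      intro v hvx
      have h0 : (xs.takeWhile (fun y => y == x)).count v = 0 :=
        List.count_eq_zero.2 (fun h => hvx (hrun_all v h))
      rw [List.count_cons_of_ne hvx.symm]
      conv_lhs => rw [← hsplit]
      rw [List.count_append, h0, Nat.zero_add]
    obtain ⟨ihpw, ihmem⟩ := ih hrest_sorted
    simp only [runPairs]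
    constructor
    · refine List.pairwise_append.2 ⟨?_, ihpw, ?_⟩
      · split <;> simp
      · intro a ha b hb
        have hax : a = x := by split at ha <;> simp_all
        subst hax
        exact hgt b (runPairs_subset _ b hb)
    · intro v
      rw [List.mem_append]
      by_cases hvx : v = x
      · subst hvx
        have hnot : v ∉ runPairs (xs.dropWhile (fun y => y == v)) :=
          fun h => lt_irrefl v (hgt v (runPairs_subset _ v h))
        rw [hcx]
        constructor
        · rintro (h | h)
          · have h2 : (xs.takeWhile (fun y => y == v)).length + 1 = 2 := by
              by_contra hne; simp [hne] at h
            omega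
          · exact absurd h hnot
        · intro h
          left
          have h2 : (xs.takeWhile (fun y => y == v)).length + 1 = 2 := by omega
          simp [h2]
      · have hvnotite : v ∉ (if (xs.takeWhile (fun y => y == x)).length + 1 = 2 then [x] else []) := by
          split <;> simp_all
        rw [hcv v hvx]
        constructor
        · rintro (h | h)
          · exact absurd h hvnotite
          · exact (ihmem v).1 h
        · intro h
          exact Or.inr ((ihmem v).2 h)

-- ===== VERDICT (by name: the statement is the Claim_ definition above) =====
theorem find_two_pair_py_spec : Claim_equal_find_two_pair_py := by
  intro values _
  unfold Spec_find_two_pair_py find_two_pair_py find_two_pair_py_alt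
  have hs : (PySem.List.sorted values (fun x => x) false).Pairwise (· ≤ ·) := by
    simpa using PySem.List.sorted_pairwise values (fun x => x)
  obtain ⟨hpw, hmem⟩ := runPairs_sorted_facts _ hs
  have hperm_s : (PySem.List.sorted values (fun x => x) false).Perm values :=
    PySem.List.sorted_perm values (fun x => x) false
  have hPA : (PySem.Set.ofList values).foldl
      (fun acc value => if values.count value = 2 then acc ++ [value] else acc) []
      = (PySem.Set.ofList values).filter (fun v => decide (values.count v = 2)) := by
    simpa using PySem.List.foldl_append_ite_eq_filter
      (l := PySem.Set.ofList values) (p := fun v => values.count v = 2) (acc := [])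
  have hPAnodup : ((PySem.Set.ofList values).filter
      (fun v => decide (values.count v = 2))).Nodup :=
    (PySem.Set.nodup_ofList values).filter _
  have hrnodup : (runPairs (PySem.List.sorted values (fun x => x) false)).Nodup :=
    hpw.imp (fun h => ne_of_lt h)
  have hmem' : ∀ v : Int,
      v ∈ runPairs (PySem.List.sorted values (fun x => x) false) ↔ values.count v = 2 := by
    intro v
    rw [hmem v, hperm_s.count_eq]
  have hperm : (runPairs (PySem.List.sorted values (fun x => x) false)).reverse.Perm
      ((PySem.Set.ofList values).filter (fun v => decide (values.count v = 2))) := by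
    rw [List.perm_ext_iff_of_nodup (by simpa using hrnodup) hPAnodup]
    intro a
    rw [List.mem_reverse, hmem' a, List.mem_filter]
    simp only [PySem.Set.mem_ofList, decide_eq_true_eq]
    constructor
    · intro h
      exact ⟨List.count_pos_iff.1 (by omega), h⟩
    · exact fun h => h.2
  have hsorted : PySem.List.sorted
      ((PySem.Set.ofList values).filter (fun v => decide (values.count v = 2)))
      (fun x => x) true
      = (runPairs (PySem.List.sorted values (fun x => x) false)).reverse := by
    refine PySem.List.sorted_rev_eq_of_perm_of_pairwise_gt _ _ _ hperm ?_
    rw [List.pairwise_reverse]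
    exact hpw
  rw [hPA]
  have hlen : ((PySem.Set.ofList values).filter
      (fun v => decide (values.count v = 2))).length
      = (runPairs (PySem.List.sorted values (fun x => x) false)).length := by
    rw [← hperm.length_eq, List.length_reverse]
  set r := runPairs (PySem.List.sorted values (fun x => x) false) with hr
  by_cases h2 : 2 ≤ r.length
  · rw [if_pos (by omega), if_pos h2, hsorted]
    have h10 : r.length - 1 < r.length := by omega
    have h21 : r.length - 2 < r.length := by omega
    have e0 : PySem.List.pyGet? r.reverse 0 = some r[r.length - 1] := by
      rw [PySem.List.pyGet?_zero, List.getElem?_reverse (by omega)]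
      have hi : r.length - 1 - 0 = r.length - 1 := by omega
      rw [hi, List.getElem?_eq_getElem h10]
    have e1 : PySem.List.pyGet? r.reverse 1 = some r[r.length - 2] := by
      have h1 : ((1 : Nat) : Int) = (1 : Int) := rfl
      rw [← h1, PySem.List.pyGet?_natCast, List.getElem?_reverse (by omega)]
      have hi : r.length - 1 - 1 = r.length - 2 := by omega
      rw [hi, List.getElem?_eq_getElem h21]
    have f0 : PySem.List.pyGet? r (-1) = some r[r.length - 1] := by
      rw [PySem.List.pyGet?_neg_ofNat r 1 (by norm_num) (by omega),
        List.getElem?_eq_getElem h10]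
    have f1 : PySem.List.pyGet? r (-2) = some r[r.length - 2] := by
      rw [PySem.List.pyGet?_neg_ofNat r 2 (by norm_num) (by omega),
        List.getElem?_eq_getElem h21]
    simp only [← hr, e0, e1, f0, f1]
  · rw [if_neg (by omega), if_neg (by omega)]
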